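-- pv_equiv track=rewrite | github.com/NolanDeveloper/advent-of-code-2022 | solutions/day_01.py | parse
-- ===== SOURCE A (Python) =====
-- def parse(input):
--     lines = input.splitlines()
--     lines.append("")
--     elves = []
--     current_elf = []
--     for line in lines:
--         line = line.strip()
--         if not line:
--             elves.append(current_elf)
--             current_elf = []
--         else:
--             current_elf.append(int(line))
--     return elves
-- ===== SOURCE B (Python) =====
-- def parse(input):
--     stripped = [l.strip() for l in input.splitlines()]
--     seps = [i for i, l in enumerate(stripped) if not l]
--     elves = []
--     prev = 0
--     for i in seps:
--         elves.append([int(x) for x in stripped[prev:i]])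
--         prev = i + 1
--     elves.append([int(x) for x in stripped[prev:]])
--     return elves
-- ===== Notes on version B (the rewrite author's own statement) =====
-- stated objective: alternative
-- what changed: Replaces A's single accumulator loop with a sentinel blank line by a two-pass decomposition: build the list of blank-line indices first, then cut the stripped line list into slices between consecutive separators (plus the trailing slice) and int() each slice.
import Mathlib
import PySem

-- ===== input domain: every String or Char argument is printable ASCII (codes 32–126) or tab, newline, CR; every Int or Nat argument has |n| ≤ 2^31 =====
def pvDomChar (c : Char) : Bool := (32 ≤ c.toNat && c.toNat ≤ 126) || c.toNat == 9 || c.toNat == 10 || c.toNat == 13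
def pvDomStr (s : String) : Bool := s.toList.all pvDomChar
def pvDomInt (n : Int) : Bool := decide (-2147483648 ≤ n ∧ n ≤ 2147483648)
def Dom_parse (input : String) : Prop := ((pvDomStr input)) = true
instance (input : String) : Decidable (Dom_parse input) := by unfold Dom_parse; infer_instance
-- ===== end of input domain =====

-- B replaces A's sentinel-terminated accumulator loop by a separator-index pass followed by a slicing pass (objective: alternative decomposition, same cost).

-- int(line); Pre_parse guarantees ofStr? is some on every line it is applied to, so getD 0 is never taken.
def pyInt (s : String) : Int := (PySem.Int.ofStr? s).getD 0

-- ===== PORT A =====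
def parse (input : String) : List (List Int) :=
  let lines := PySem.Str.splitlines input ++ [""]
  (lines.foldl
    (fun (acc : List (List Int) × List Int) line =>
      let line := PySem.Str.strip line
      if line = "" then (acc.1 ++ [acc.2], [])
      else (acc.1, acc.2 ++ [pyInt line]))
    ([], [])).1

-- ===== PORT B =====
def parse_alt (input : String) : List (List Int) :=
  let stripped := (PySem.Str.splitlines input).map PySem.Str.strip
  let seps := (PySem.List.enumerate stripped).foldl
      (fun (acc : List Int) p => if p.2 = "" then acc ++ [p.1] else acc) []
  let st := seps.foldl
      (fun (acc : List (List Int) × Int) i =>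
        (acc.1 ++ [(PySem.List.slice stripped (some acc.2) (some i)).map pyInt], i + 1))
      ([], 0)
  st.1 ++ [(PySem.List.slice stripped (some st.2) none).map pyInt]

-- ===== PRECONDITION & SPEC =====
-- Pre_: exactly the inputs A returns on — every nonempty stripped line must parse as int (else Python's int() raises ValueError).
def Pre_parse (input : String) : Prop :=
  ∀ l ∈ (PySem.Str.splitlines input).map PySem.Str.strip,
    l ≠ "" → (PySem.Int.ofStr? l).isSome
instance (input : String) : Decidable (Pre_parse input) := by unfold Pre_parse; infer_instance
def pvWitness_parse : String := "1\n 2 \n\n+3"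
def Spec_parse (input : String) (out : List (List Int)) : Prop := out = parse_alt input
instance (input : String) (out : List (List Int)) : Decidable (Spec_parse input out) := by unfold Spec_parse; infer_instance

-- ===== CLAIM (what is proved, stated in full; the proofs are below) =====
def Claim_equal_parse : Prop := ∀ (input : String), Dom_parse input → Pre_parse input → Spec_parse input (parse input)

-- ===== LEMMAS AND PROOFS =====

-- Common spec: split an (already stripped) line list at blanks, int-ing the rest.
def split : List String → List (List Int)
  | [] => [[]]
  | l :: ls =>
    if l = "" then [] :: split ls
    else (pyInt l :: (split ls).headI) :: (split ls).tail

lemma split_cons (M : List String) : split M = (split M).headI :: (split M).tail := by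
  cases M with
  | nil => simp [split]
  | cons l ls => simp [split]; split_ifs <;> simp

-- A-side step on an already-stripped line
def stepS (acc : List (List Int) × List Int) (line : String) : List (List Int) × List Int :=
  if line = "" then (acc.1 ++ [acc.2], []) else (acc.1, acc.2 ++ [pyInt line])

lemma A_fold (M : List String) : ∀ (es : List (List Int)) (cur : List Int),
    ((M ++ [""]).foldl stepS (es, cur)).1
      = es ++ ((cur ++ (split M).headI) :: (split M).tail) := by
  induction M with
  | nil => intro es cur; simp [stepS, split]
  | cons l ls ih =>
    intro es cur
    by_cases h : l = "" <;>
      simp only [List.cons_append, List.foldl_cons, stepS, h, if_true, if_false, ih, split]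
    · rw [split_cons ls]; simp
    · simp

lemma parse_eq_split (input : String) :
    parse input = split ((PySem.Str.splitlines input).map PySem.Str.strip) := by
  have hmap : ((PySem.Str.splitlines input ++ [""]).map PySem.Str.strip)
      = (PySem.Str.splitlines input).map PySem.Str.strip ++ [""] := by
    simp; decide
  have hfold : (PySem.Str.splitlines input ++ [""]).foldl
      (fun (acc : List (List Int) × List Int) line =>
        let line := PySem.Str.strip line
        if line = "" then (acc.1 ++ [acc.2], [])
        else (acc.1, acc.2 ++ [pyInt line])) ([], [])
      = ((PySem.Str.splitlines input ++ [""]).map PySem.Str.strip).foldl stepS ([], []) := by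
    rw [List.foldl_map]; rfl
  show ((PySem.Str.splitlines input ++ [""]).foldl _ ([], [])).1 = _
  rw [hfold, hmap, A_fold]
  simpa using (split_cons ((PySem.Str.splitlines input).map PySem.Str.strip)).symm

-- B-side: the separator indices of an (already stripped) list, as naturals.
def sepsN : List String → List Nat
  | [] => []
  | l :: ls => if l = "" then 0 :: (sepsN ls).map (· + 1) else (sepsN ls).map (· + 1)

lemma map_shift (xs : List Nat) (k : Int) :
    (xs.map (· + 1)).map (fun n : Nat => (n : Int) + k)
      = xs.map (fun n : Nat => (n : Int) + (k + 1)) := by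
  induction xs with
  | nil => rfl
  | cons a t ih =>
    simp only [List.map_cons, ih]
    congr 1
    push_cast
    ring

lemma enum_fold (M : List String) : ∀ (s : Int) (acc : List Int),
    (PySem.List.enumerate M s).foldl
        (fun (acc : List Int) p => if p.2 = "" then acc ++ [p.1] else acc) acc
      = acc ++ (sepsN M).map (fun n : Nat => (n : Int) + s) := by
  induction M with
  | nil => intro s acc; simp [PySem.List.enumerate_nil, sepsN]
  | cons l ls ih =>
    intro s acc
    rw [PySem.List.enumerate_cons]
    by_cases h : l = "" <;>
      simp only [List.foldl_cons, h, reduceIte, ih, sepsN, List.map_cons, map_shift]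
    · simp

-- Nat-level model of B's slicing fold
def foldBN (M : List String) : List Nat → List (List Int) × Nat → List (List Int) × Nat
  | [], st => st
  | n :: s, (gs, p) => foldBN M s (gs ++ [((M.drop p).take (n - p)).map pyInt], n + 1)

lemma foldB_model (M : List String) (s : List Nat) :
    ∀ (gs : List (List Int)) (p : Nat),
    (s.map (fun n : Nat => (n : Int))).foldl
        (fun (acc : List (List Int) × Int) i =>
          (acc.1 ++ [(PySem.List.slice M (some acc.2) (some i)).map pyInt], i + 1))
        (gs, (p : Int))
      = ((foldBN M s (gs, p)).1, ((foldBN M s (gs, p)).2 : Int)) := by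
  induction s with
  | nil => intro gs p; simp [foldBN]
  | cons n s ih =>
    intro gs p
    simp only [List.map_cons, List.foldl_cons, foldBN]
    rw [PySem.List.slice_natCast]
    have : ((n : Int) + 1) = ((n + 1 : Nat) : Int) := by push_cast; ring
    rw [this, ih]

lemma foldBN_acc (M : List String) (s : List Nat) :
    ∀ (gs : List (List Int)) (p : Nat),
    foldBN M s (gs, p) = (gs ++ (foldBN M s ([], p)).1, (foldBN M s ([], p)).2) := by
  induction s with
  | nil => intro gs p; simp [foldBN]
  | cons n s ih =>
    intro gs p
    simp only [foldBN, List.nil_append]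
    rw [ih (gs ++ [((M.drop p).take (n - p)).map pyInt]) (n + 1),
        ih [((M.drop p).take (n - p)).map pyInt] (n + 1)]
    simp

lemma foldBN_shift (l : String) (M : List String) (s : List Nat) :
    ∀ (gs : List (List Int)) (p : Nat),
    foldBN (l :: M) (s.map (· + 1)) (gs, p + 1)
      = ((foldBN M s (gs, p)).1, (foldBN M s (gs, p)).2 + 1) := by
  induction s with
  | nil => intro gs p; simp [foldBN]
  | cons n s ih =>
    intro gs p
    simp only [List.map_cons, foldBN, List.drop_succ_cons, Nat.add_sub_add_right]
    exact ih _ _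

def BresN (M : List String) : List (List Int) :=
  let st := foldBN M (sepsN M) ([], 0)
  st.1 ++ [(M.drop st.2).map pyInt]

lemma BresN_split (M : List String) : BresN M = split M := by
  induction M with
  | nil => simp [BresN, sepsN, foldBN, split]
  | cons l ls ih =>
    by_cases h : l = ""
    · subst h
      simp only [BresN, sepsN, reduceIte, foldBN, Nat.sub_self, List.take_zero, List.map_nil,
        List.nil_append]
      rw [foldBN_shift]
      rw [foldBN_acc ls (sepsN ls) [[]] 0]
      simp only [split, reduceIte]
      rw [← ih]
      simp [BresN]
    · simp only [BresN, sepsN, h, reduceIte, split]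
      cases hs : sepsN ls with
      | nil =>
        rw [← ih]
        simp [BresN, hs, foldBN]
      | cons n s =>
        simp only [List.map_cons, foldBN, List.drop_zero, Nat.sub_zero, List.take_succ_cons,
          List.map_cons, List.nil_append]
        rw [foldBN_shift]
        rw [foldBN_acc ls s [pyInt l :: (ls.take n).map pyInt] (n + 1)]
        rw [← ih]
        simp only [BresN, hs, foldBN, Nat.sub_zero, List.drop_zero, List.nil_append,
          List.drop_succ_cons]
        rw [foldBN_acc ls s [(ls.take n).map pyInt] (n + 1)]
        simp

lemma parse_alt_eq_split (input : String) :
    parse_alt input = split ((PySem.Str.splitlines input).map PySem.Str.strip) := by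
  show (let stripped := (PySem.Str.splitlines input).map PySem.Str.strip
        let seps := (PySem.List.enumerate stripped).foldl
            (fun (acc : List Int) p => if p.2 = "" then acc ++ [p.1] else acc) []
        let st := seps.foldl
            (fun (acc : List (List Int) × Int) i =>
              (acc.1 ++ [(PySem.List.slice stripped (some acc.2) (some i)).map pyInt], i + 1))
            ([], 0)
        st.1 ++ [(PySem.List.slice stripped (some st.2) none).map pyInt]) = _
  set M := (PySem.Str.splitlines input).map PySem.Str.strip with hM
  simp only
  have hseps : (PySem.List.enumerate M 0).foldl
      (fun (acc : List Int) p => if p.2 = "" then acc ++ [p.1] else acc) []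
      = (sepsN M).map (fun n : Nat => (n : Int)) := by
    rw [enum_fold]
    simp only [List.nil_append]
    exact List.map_congr_left (fun n _ => by ring)
  rw [hseps]
  have h0 : (0 : Int) = ((0 : Nat) : Int) := rfl
  rw [h0, foldB_model, PySem.List.slice_from_natCast]
  exact BresN_split M

-- ===== VERDICT (by name: the statement is the Claim_ definition above) =====
theorem parse_spec : Claim_equal_parse := by
  intro input _ _
  show parse input = parse_alt input
  rw [parse_eq_split, parse_alt_eq_split]
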